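-- pv_equiv track=rewrite | github.com/shail-1812/emailsentiment | emailsentiment/app.py | rule_engine
-- ===== SOURCE A (Python) =====
-- def rule_engine(email):
--     interested_bi_grams = ["we are", "interested in"]
--     interested_quad_grams = ["thanks for reaching out", "would be happy to", "like to learn more", "please let me know", "would like to learn", "to learn more about", "hi thanks for reaching"]
--     not_interested_quad_grams = ["interested at this time", "not interested at this", "we are not interested", "am not interested at", "we are all set", "are not interested at", "for reaching out we"]
--
--
--     if email == "":
--         count_cannotbedetermined += 1
--     else:
--         email = str.lower(email)
--         count_bi = 0
--         for i in range(len(interested_bi_grams)):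
--             if interested_bi_grams[i] in email:
--                 count_bi += 1
--
--         count_quad = 0
--         for i in range(len(interested_quad_grams)):
--             if interested_quad_grams[i] in email:
--                 count_quad += 1
--
--         P = 20 * count_bi + 40 * count_quad
--
--         count_quad = 0
--         for i in range(len(not_interested_quad_grams)):
--             if not_interested_quad_grams[i] in email:
--                 count_quad += 1
--
--         N = 40 * count_quad
--
--         if "unsubscribe" in email:
--             return 1
--         elif P >= 40 and N <= 20:
--             return 2
--
--         elif P <= 20 and N >= 40:
--             return 3
--         else:
--             return 4
-- ===== SOURCE B (Python) =====
-- POS_QUAD_GRAMS = ["thanks for reaching out", "would be happy to", "like to learn more",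
--                   "please let me know", "would like to learn", "to learn more about",
--                   "hi thanks for reaching"]
-- NEG_QUAD_GRAMS = ["interested at this time", "not interested at this", "we are not interested",
--                   "am not interested at", "we are all set", "are not interested at",
--                   "for reaching out we"]
--
-- def rule_engine(email):
--     # A's weighted scores only matter through two booleans:
--     # P >= 40  <=>  some positive quad-gram present, or both bi-grams present (20+20);
--     # N >= 40  <=>  some negative quad-gram present (and N <= 20 <=> none is).
--     e = email.lower()
--     if "unsubscribe" in e:
--         return 1
--     pos = any(q in e for q in POS_QUAD_GRAMS) or ("we are" in e and "interested in" in e)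
--     neg = any(q in e for q in NEG_QUAD_GRAMS)
--     if pos and not neg:
--         return 2
--     if not pos and neg:
--         return 3
--     return 4
-- ===== Notes on version B (the rewrite author's own statement) =====
-- stated objective: simpler
-- what changed: Replaces A's weighted counting (three counter loops, P and N scores, threshold comparisons) by two short-circuiting boolean existence checks, since the thresholds collapse exactly to whether any positive quad-gram (or both bi-grams) occurs and whether any negative quad-gram occurs; no counts or scores are computed, and the unsubscribe check is hoisted before scoring.
-- outside the precondition, e.g. on rule_engine(''): A raises UnboundLocalError, B returns 4
import Mathlib
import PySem

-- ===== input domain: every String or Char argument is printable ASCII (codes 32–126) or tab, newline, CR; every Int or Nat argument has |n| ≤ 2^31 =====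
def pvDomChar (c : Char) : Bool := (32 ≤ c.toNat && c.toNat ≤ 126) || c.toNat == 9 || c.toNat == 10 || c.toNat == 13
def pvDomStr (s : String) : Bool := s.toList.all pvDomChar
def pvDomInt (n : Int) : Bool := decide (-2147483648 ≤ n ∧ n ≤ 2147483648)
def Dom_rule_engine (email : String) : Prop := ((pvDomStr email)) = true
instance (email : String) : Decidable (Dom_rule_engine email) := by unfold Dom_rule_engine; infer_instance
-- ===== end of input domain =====

-- B drops A's weighted counters entirely: the score thresholds collapse to two boolean
-- existence checks (some positive quad-gram or both bi-grams; some negative quad-gram),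
-- so B computes only those booleans; simpler, same cost.
-- A raises UnboundLocalError on email = "" (excluded by Pre_); B returns 4 there.

-- ===== PORT A =====
def pvBi : List String := ["we are", "interested in"]
def pvQuad : List String := ["thanks for reaching out", "would be happy to", "like to learn more", "please let me know", "would like to learn", "to learn more about", "hi thanks for reaching"]
def pvNeg : List String := ["interested at this time", "not interested at this", "we are not interested", "am not interested at", "we are all set", "are not interested at", "for reaching out we"]

def rule_engine (email : String) : Int :=
  if email == "" then 0  -- A raises UnboundLocalError here; excluded by Pre_rule_engine
  else
    let e := PySem.Str.lower email
    let count_bi : Int := (PySem.List.pyRange 0 (pvBi.length : Int) 1).foldl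
      (fun acc i => if PySem.Str.isIn (PySem.List.pyGetD pvBi i "") e then acc + 1 else acc) 0
    let count_quad : Int := (PySem.List.pyRange 0 (pvQuad.length : Int) 1).foldl
      (fun acc i => if PySem.Str.isIn (PySem.List.pyGetD pvQuad i "") e then acc + 1 else acc) 0
    let P : Int := 20 * count_bi + 40 * count_quad
    let count_quad2 : Int := (PySem.List.pyRange 0 (pvNeg.length : Int) 1).foldl
      (fun acc i => if PySem.Str.isIn (PySem.List.pyGetD pvNeg i "") e then acc + 1 else acc) 0
    let N : Int := 40 * count_quad2
    if PySem.Str.isIn "unsubscribe" e then 1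
    else if P ≥ 40 ∧ N ≤ 20 then 2
    else if P ≤ 20 ∧ N ≥ 40 then 3
    else 4

-- ===== PORT B =====
def rule_engine_alt (email : String) : Int :=
  let e := PySem.Str.lower email
  if PySem.Str.isIn "unsubscribe" e then 1
  else
    let pos := pvQuad.any (fun q => PySem.Str.isIn q e)
               || (PySem.Str.isIn "we are" e && PySem.Str.isIn "interested in" e)
    let neg := pvNeg.any (fun q => PySem.Str.isIn q e)
    if pos && !neg then 2
    else if !pos && neg then 3
    else 4

-- ===== PRECONDITION & SPEC =====
-- Pre_ excludes exactly email = "", where A raises UnboundLocalError.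
def Pre_rule_engine (email : String) : Prop := email ≠ ""
instance (email : String) : Decidable (Pre_rule_engine email) := by unfold Pre_rule_engine; infer_instance
def pvWitness_rule_engine : String := "we are interested in this"

def Spec_rule_engine (email : String) (out : Int) : Prop := out = rule_engine_alt email
instance (email : String) (out : Int) : Decidable (Spec_rule_engine email out) := by unfold Spec_rule_engine; infer_instance

-- ===== CLAIM =====
def Claim_equal_rule_engine : Prop := ∀ (email : String), Dom_rule_engine email → Pre_rule_engine email → Spec_rule_engine email (rule_engine email)

-- ===== LEMMAS AND PROOFS =====

theorem pvAnyCount {α : Type} (f : α → Bool) (l : List α) :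
    l.any f = true ↔ 0 < l.countP (fun x => f x) := by
  induction l with
  | nil => simp
  | cons a t ih =>
    by_cases h : f a = true <;> simp [List.any_cons, h, ih]

-- A's threshold decision equals B's boolean decision, for any membership predicate f.
theorem pvCore (f : String → Bool) (u : Bool) :
    (if u = true then (1:Int)
     else if 40 ≤ 20 * ((pvBi.countP (fun q => f q) : Nat) : Int) + 40 * ((pvQuad.countP (fun q => f q) : Nat) : Int)
              ∧ 40 * ((pvNeg.countP (fun q => f q) : Nat) : Int) ≤ 20 then 2
     else if 20 * ((pvBi.countP (fun q => f q) : Nat) : Int) + 40 * ((pvQuad.countP (fun q => f q) : Nat) : Int) ≤ 20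
              ∧ 40 ≤ 40 * ((pvNeg.countP (fun q => f q) : Nat) : Int) then 3
     else 4)
    = (if u = true then 1
       else if (pvQuad.any f || (f "we are" && f "interested in")) && !(pvNeg.any f) then 2
       else if !(pvQuad.any f || (f "we are" && f "interested in")) && pvNeg.any f then 3
       else 4) := by
  cases u with
  | true => rfl
  | false =>
    simp only [Bool.false_eq_true, if_false]
    have hcb : pvBi.countP (fun q => f q) ≤ 2 :=
      le_trans (List.countP_le_length) (by simp [pvBi])
    have hbi : pvBi.countP (fun q => f q) = 2 ↔ (f "we are" && f "interested in") = true := by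
      by_cases h1 : f "we are" = true <;> by_cases h2 : f "interested in" = true <;>
        simp [pvBi, h1, h2]
    have hq := pvAnyCount f pvQuad
    have hn := pvAnyCount f pvNeg
    rcases Bool.eq_false_or_eq_true (pvQuad.any f) with hQ | hQ <;>
      rcases Bool.eq_false_or_eq_true (pvNeg.any f) with hN | hN <;>
      rcases Bool.eq_false_or_eq_true (f "we are" && f "interested in") with hB | hB <;>
      rw [hQ] at hq <;> rw [hN] at hn <;> rw [hB] at hbi <;>
      simp only [Bool.false_eq_true, false_iff, true_iff, iff_false, iff_true,
        Nat.pos_iff_ne_zero] at hq hn hbi <;>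
      simp only [hQ, hN, hB, Bool.or_true, Bool.or_false, Bool.and_true, Bool.and_false,
        Bool.not_false, Bool.not_true, Bool.false_eq_true, if_false, if_true] <;>
      split_ifs <;> omega

-- ===== VERDICT =====
theorem rule_engine_spec : Claim_equal_rule_engine := by
  intro email _ hpre
  unfold Spec_rule_engine
  have hne : (email == "") = false := by
    simpa [Pre_rule_engine] using hpre
  simp only [rule_engine, rule_engine_alt, hne, Bool.false_eq_true, if_false]
  rw [PySem.List.foldl_pyRange_zero_pyGetD' pvBi ""
        (fun acc v => if PySem.Str.isIn v (PySem.Str.lower email) then acc + 1 else acc) 0,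
      PySem.List.foldl_pyRange_zero_pyGetD' pvQuad ""
        (fun acc v => if PySem.Str.isIn v (PySem.Str.lower email) then acc + 1 else acc) 0,
      PySem.List.foldl_pyRange_zero_pyGetD' pvNeg ""
        (fun acc v => if PySem.Str.isIn v (PySem.Str.lower email) then acc + 1 else acc) 0,
      PySem.List.foldl_if_add_one, PySem.List.foldl_if_add_one, PySem.List.foldl_if_add_one]
  simp only [zero_add]
  exact pvCore (fun q => PySem.Str.isIn q (PySem.Str.lower email))
    (PySem.Str.isIn "unsubscribe" (PySem.Str.lower email))
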